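-- pv_equiv track=rewrite | github.com/boazlavon/cores_project | s2e-coref/cores_dir_inference.py | match_mention
-- ===== SOURCE A (Python) =====
-- MEN_SPAN_STR_IDX = 2
--
-- def match_mention(mention, words, words_str, suffix_map):
--     i = -1
--     span_str = mention[MEN_SPAN_STR_IDX].lower()
--     found_idxs = []
--     while i < len(words_str):
--         span_idx = words_str.find(span_str, i + 1, len(words_str))
--
--         if span_idx == -1:
--             break;
--
--         # if we match part of other words, continue
--         if span_idx > 0 and words_str[span_idx - 1] != ' ':
--             i = span_idx
--             continue
--         if span_idx + len(span_str) < (len(words_str) - 1) and words_str[span_idx + len(span_str)] != ' ':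
--             i = span_idx
--             continue
--
--         found_idxs.append(span_idx)
--         i = span_idx
--     return found_idxs
-- ===== SOURCE B (Python) =====
-- MEN_SPAN_STR_IDX = 2
--
-- def match_mention(mention, words, words_str, suffix_map):
--     span_str = mention[MEN_SPAN_STR_IDX].lower()
--     n = len(words_str)
--     starts = [0] + [j + 1 for j in range(n) if words_str[j] == ' ']
--     found_idxs = []
--     for p in starts:
--         if words_str[p:p + len(span_str)] == span_str and (p + len(span_str) >= n - 1 or words_str[p + len(span_str)] == ' '):
--             found_idxs.append(p)
--     return found_idxs
-- ===== Notes on version B (the rewrite author's own statement) =====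
-- stated objective: alternative
-- what changed: B precomputes the list of candidate word-start offsets (0 plus every index after a space) in one pass and filters them with a substring-match and right-boundary test, instead of A's while loop that repeatedly calls str.find and re-checks both boundaries at each occurrence.
import Mathlib
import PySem

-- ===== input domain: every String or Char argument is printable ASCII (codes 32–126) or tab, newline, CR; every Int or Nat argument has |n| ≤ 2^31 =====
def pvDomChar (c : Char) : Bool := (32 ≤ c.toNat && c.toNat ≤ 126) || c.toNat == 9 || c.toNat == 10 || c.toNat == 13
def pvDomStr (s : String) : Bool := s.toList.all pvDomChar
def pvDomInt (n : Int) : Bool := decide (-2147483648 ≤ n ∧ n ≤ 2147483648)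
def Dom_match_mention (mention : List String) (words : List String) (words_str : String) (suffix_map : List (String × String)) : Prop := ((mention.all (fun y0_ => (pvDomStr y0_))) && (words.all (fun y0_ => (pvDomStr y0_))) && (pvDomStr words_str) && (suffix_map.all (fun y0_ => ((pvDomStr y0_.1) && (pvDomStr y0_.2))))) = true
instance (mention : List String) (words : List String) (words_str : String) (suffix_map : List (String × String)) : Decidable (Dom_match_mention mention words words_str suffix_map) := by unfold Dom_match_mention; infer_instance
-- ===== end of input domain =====

-- ===== PORT A =====
-- B precomputes the candidate word-start offsets once and filters them, replacing A's repeated str.find scanning loop.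
-- A-side termination helpers: a successful find(span_str, i+1, len) lands strictly beyond i (cited by pvLoopA's decreasing_by).
lemma pvFindNonnegShift (sp t : List Char) (st' i : Int) (hst : i < st')
    (h : ¬ PySem.Chars.find t sp = -1) : i < st' + PySem.Chars.find t sp := by
  have := PySem.Chars.neg_one_le_find t sp; omega

lemma pvFindFrom_progress (s sp : List Char) (i : Int)
    (h : ¬ PySem.Chars.findFrom s sp (i + 1) (some ((s.length : Nat) : Int)) = -1) :
    i < PySem.Chars.findFrom s sp (i + 1) (some ((s.length : Nat) : Int)) := by
  simp only [PySem.Chars.findFrom] at h ⊢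
  split_ifs at h ⊢ <;> first
    | omega
    | exact pvFindNonnegShift _ _ _ _ (by omega) (by assumption)

-- the while-loop of A: i is the cursor; each iteration finds the next occurrence from i+1
def pvLoopA (s sp : List Char) (i : Int) : List Int :=
  if hi : i < ((s.length : Nat) : Int) then
    let j := PySem.Chars.findFrom s sp (i + 1) (some ((s.length : Nat) : Int))
    if hj : j = -1 then []
    else if 0 < j ∧ ¬ PySem.List.pyGet? s (j - 1) = some ' ' then pvLoopA s sp j
    else if j + (sp.length : Int) < ((s.length : Nat) : Int) - 1 ∧
            ¬ PySem.List.pyGet? s (j + (sp.length : Int)) = some ' ' then pvLoopA s sp j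
    else j :: pvLoopA s sp j
  else []
termination_by ((s.length : Int) + 1 - i).toNat
decreasing_by
  all_goals (have hp := pvFindFrom_progress s sp i hj; omega)

def match_mention (mention : List String) (words : List String) (words_str : String) (suffix_map : List (String × String)) : List Int :=
  let span_str := PySem.Str.lower ((PySem.List.pyGet? mention 2).getD "")
  pvLoopA words_str.toList span_str.toList (-1)

-- ===== PORT B =====
def match_mention_alt (mention : List String) (words : List String) (words_str : String) (suffix_map : List (String × String)) : List Int :=
  let sp := (PySem.Str.lower ((PySem.List.pyGet? mention 2).getD "")).toList
  let s := words_str.toList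
  let n : Int := ((s.length : Nat) : Int)
  let starts : List Int :=
    0 :: ((PySem.List.pyRange 0 n 1).filter (fun j => PySem.List.pyGet? s j = some ' ')).map (fun j => j + 1)
  starts.foldl
    (fun acc p =>
      if PySem.List.slice s (some p) (some (p + (sp.length : Int))) = sp ∧
          (n - 1 ≤ p + (sp.length : Int) ∨ PySem.List.pyGet? s (p + (sp.length : Int)) = some ' ')
      then acc ++ [p] else acc) []

-- ===== PRECONDITION & SPEC =====
-- Pre_ excludes exactly the inputs on which the Python A raises: mention[2] is an IndexError when mention has fewer than 3 elements.
def Pre_match_mention (mention : List String) (words : List String) (words_str : String) (suffix_map : List (String × String)) : Prop :=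
  3 ≤ mention.length
instance (mention : List String) (words : List String) (words_str : String) (suffix_map : List (String × String)) : Decidable (Pre_match_mention mention words words_str suffix_map) := by unfold Pre_match_mention; infer_instance

def pvWitness_match_mention : List String × List String × String × (List (String × String)) :=
  (["he", "x", "a"], ["a", "b", "a"], "a b a", [])

def Spec_match_mention (mention : List String) (words : List String) (words_str : String) (suffix_map : List (String × String)) (out : List Int) : Prop := out = match_mention_alt mention words words_str suffix_map
instance (mention : List String) (words : List String) (words_str : String) (suffix_map : List (String × String)) (out : List Int) : Decidable (Spec_match_mention mention words words_str suffix_map out) := by unfold Spec_match_mention; infer_instance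

-- ===== CLAIM (what is proved, stated in full; the proofs are below) =====
def Claim_equal_match_mention : Prop := ∀ (mention : List String) (words : List String) (words_str : String) (suffix_map : List (String × String)), Dom_match_mention mention words words_str suffix_map → Pre_match_mention mention words words_str suffix_map → Spec_match_mention mention words words_str suffix_map (match_mention mention words words_str suffix_map)

-- ===== LEMMAS AND PROOFS =====
-- a word-boundary hit at position p: span occurs at p, left side is start-of-text or a space,
-- right side is (past) the last char or a space — exactly A's acceptance tests
def pvCond (s sp : List Char) (p : Nat) : Bool :=
  decide (sp <+: s.drop p) &&
  (decide (p = 0) || decide (s[p-1]? = some ' ')) &&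
  (decide (s.length ≤ p + sp.length + 1) || decide (s[p + sp.length]? = some ' '))

def pvSpecL (s sp : List Char) (k : Nat) : List Int :=
  ((List.range' k (s.length + 1 - k)).filter (pvCond s sp)).map (fun p : Nat => (p : Int))

lemma pvPointwise (s sp : List Char) (p : Nat) :
    (decide (PySem.List.slice s (some (p : Int)) (some ((p : Int) + (sp.length : Int))) = sp ∧
        (((s.length : Nat) : Int) - 1 ≤ (p : Int) + (sp.length : Int) ∨
          PySem.List.pyGet? s ((p : Int) + (sp.length : Int)) = some ' '))
      && (decide (p = 0) || decide (s[p - 1]? = some ' ')))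
    = pvCond s sp p := by
  have hcast : (p : Int) + (sp.length : Int) = ((p + sp.length : Nat) : Int) := by push_cast; ring
  simp only [PySem.List.slice_natCast_add]
  simp only [hcast, PySem.List.pyGet?_natCast]
  simp only [Bool.decide_and, Bool.decide_or]
  have h1 : decide (List.take sp.length (List.drop p s) = sp) = decide (sp <+: List.drop p s) := by
    apply decide_eq_decide.mpr
    rw [List.prefix_iff_eq_take]; exact comm
  have h2 : decide (((s.length : Nat) : Int) - 1 ≤ ((p + sp.length : Nat) : Int)) = decide (s.length ≤ p + sp.length + 1) := by
    apply decide_eq_decide.mpr; omega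
  rw [h1, h2]
  simp only [pvCond]
  ac_rfl

lemma pvAltCore (sp s : List Char) :
    (((0 : Int) :: ((PySem.List.pyRange 0 ((s.length : Nat) : Int) 1).filter
        (fun j => PySem.List.pyGet? s j = some ' ')).map (fun j => j + 1)).foldl
      (fun acc p =>
        if PySem.List.slice s (some p) (some (p + (sp.length : Int))) = sp ∧
            (((s.length : Nat) : Int) - 1 ≤ p + (sp.length : Int) ∨ PySem.List.pyGet? s (p + (sp.length : Int)) = some ' ')
        then acc ++ [p] else acc) [])
    = pvSpecL s sp 0 := by
  have hfun : (fun (acc : List Int) (p : Int) =>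
      if PySem.List.slice s (some p) (some (p + (sp.length : Int))) = sp ∧
          (((s.length : Nat) : Int) - 1 ≤ p + (sp.length : Int) ∨ PySem.List.pyGet? s (p + (sp.length : Int)) = some ' ')
      then acc ++ [p] else acc)
    = (fun (acc : List Int) (p : Int) =>
      if (fun p : Int => decide (PySem.List.slice s (some p) (some (p + (sp.length : Int))) = sp ∧
          (((s.length : Nat) : Int) - 1 ≤ p + (sp.length : Int) ∨ PySem.List.pyGet? s (p + (sp.length : Int)) = some ' '))) p = true
      then acc ++ [(fun p : Int => p) p] else acc) := by
    funext acc p; simp only [decide_eq_true_eq]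
  rw [hfun, PySem.List.foldl_append_if, List.nil_append, List.map_id']
  rw [PySem.List.pyRange_zero_natCast]
  have hg : (List.filter (fun j => decide (PySem.List.pyGet? s j = some ' ')) (List.map (fun k : Nat => (k : Int)) (List.range s.length)))
      = List.map (fun k : Nat => (k : Int)) (List.filter (fun j : Nat => decide (s[j]? = some ' ')) (List.range s.length)) := by
    rw [List.filter_map]
    apply congrArg
    apply List.filter_congr
    intro j _
    simp [Function.comp, PySem.List.pyGet?_natCast]
  rw [hg]
  have hsh : ((0 : Int) :: List.map (fun j => j + 1) (List.map (fun k : Nat => (k : Int)) (List.filter (fun j : Nat => decide (s[j]? = some ' ')) (List.range s.length))))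
      = List.map (fun p : Nat => (p : Int)) (0 :: List.map (fun j => j + 1) (List.filter (fun j : Nat => decide (s[j]? = some ' ')) (List.range s.length))) := by
    simp only [List.map_cons, Nat.cast_zero, List.map_map]
    congr 1
  rw [hsh]
  have hL1 : (0 :: List.map (fun j => j + 1) (List.filter (fun j : Nat => decide (s[j]? = some ' ')) (List.range s.length)))
      = List.filter (fun p : Nat => decide (p = 0) || decide (s[p-1]? = some ' ')) (List.range (s.length + 1)) := by
    rw [List.range_succ_eq_map, List.filter_cons, List.filter_map]
    simp only [decide_true, Bool.true_or, if_true]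
    congr 1
  rw [hL1, List.filter_map, List.filter_filter]
  simp only [Function.comp]
  rw [List.filter_congr (fun p (_ : p ∈ List.range (s.length + 1)) => pvPointwise s sp p)]
  unfold pvSpecL
  rw [Nat.sub_zero, ← List.range_eq_range']

lemma pvFindFrom_end_len (s sp : List Char) (st : Int) :
    PySem.Chars.findFrom s sp st (some ((s.length : Nat) : Int)) = PySem.Chars.findFrom s sp st none := by
  have h1 : ¬ ((s.length : Int) < 0) := by omega
  simp only [PySem.Chars.findFrom, lt_irrefl, if_false, if_neg h1, Int.toNat_natCast, List.take_length]

lemma pvInfix_of_prefix_drop (s sp : List Char) (k p : Nat) (hk : k ≤ p)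
    (h : sp <+: s.drop p) : sp <:+: s.drop k := by
  have hd : s.drop p = (s.drop k).drop (p - k) := by
    rw [List.drop_drop]; congr 1; omega
  rw [hd] at h
  exact h.isInfix.trans (List.drop_suffix _ _).isInfix

lemma pvFound (s sp : List Char) (i : Int) (hi : -1 ≤ i) (hilen : i < ((s.length : Nat) : Int))
    (hj : ¬ PySem.Chars.findFrom s sp (i + 1) (some ((s.length : Nat) : Int)) = -1) :
    ∃ jn : Nat, PySem.Chars.findFrom s sp (i + 1) (some ((s.length : Nat) : Int)) = (jn : Int) ∧
      (i + 1).toNat ≤ jn ∧ jn ≤ s.length ∧ sp <+: s.drop jn ∧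
      ∀ m : Nat, (i + 1).toNat ≤ m → m < jn → ¬ sp <+: s.drop m := by
  set k := (i + 1).toNat with hk
  have hkcast : (i + 1) = (k : Int) := by omega
  have hkle : k ≤ s.length := by omega
  rw [pvFindFrom_end_len, hkcast] at hj ⊢
  have hspec := PySem.Chars.findFrom_natCast_spec s sp k hkle hj
  have hval := PySem.Chars.findFrom_natCast s sp k hkle
  have hfle := PySem.Chars.find_le_length (s.drop k) sp
  rw [List.length_drop] at hfle
  have hjle : PySem.Chars.findFrom s sp (k : Int) none ≤ (s.length : Int) := by
    rw [hval]; split_ifs <;> omega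
  refine ⟨(PySem.Chars.findFrom s sp (k : Int) none).toNat, by omega, by omega, by omega,
    hspec.2.1, ?_⟩
  intro m hm1 hm2
  exact hspec.2.2 m hm1 hm2

lemma pvSpecL_split (s sp : List Char) (k jn : Nat) (hkj : k ≤ jn) (hjl : jn ≤ s.length)
    (hmin : ∀ m : Nat, k ≤ m → m < jn → ¬ sp <+: s.drop m) :
    pvSpecL s sp k = (if pvCond s sp jn then [((jn : Nat) : Int)] else []) ++ pvSpecL s sp (jn + 1) := by
  unfold pvSpecL
  have hsplit : List.range' k (s.length + 1 - k) = List.range' k (jn - k) ++ List.range' jn (s.length + 1 - jn) := by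
    have h1 : s.length + 1 - k = (jn - k) + (s.length + 1 - jn) := by omega
    have h2 : jn = k + 1 * (jn - k) := by omega
    rw [h1, ← List.range'_append, ← h2]
  rw [hsplit, List.filter_append, List.map_append]
  have hnil : List.filter (pvCond s sp) (List.range' k (jn - k)) = [] := by
    rw [List.filter_eq_nil_iff]
    intro p hp
    rw [List.mem_range'_1] at hp
    have hnp : ¬ sp <+: s.drop p := hmin p hp.1 (by omega)
    simp [pvCond, hnp]
  rw [hnil]
  have hsucc : s.length + 1 - jn = (s.length + 1 - (jn + 1)) + 1 := by omega
  rw [hsucc, List.range'_succ, List.filter_cons]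
  split_ifs <;> simp

lemma pvLoopA_eq (s sp : List Char) (i : Int) : -1 ≤ i →
    pvLoopA s sp i = pvSpecL s sp (i + 1).toNat := by
  fun_induction pvLoopA s sp i with
  | case1 i hilen j hj =>
    intro hi
    have hj' : ¬ PySem.Chars.findFrom s sp (i + 1) (some ((s.length : Nat) : Int)) = -1 → False := by
      intro _; omega
    -- j = -1 : no occurrence of sp at or after i+1
    have hkcast : (i + 1) = (((i + 1).toNat : Nat) : Int) := by omega
    have hkle : (i + 1).toNat ≤ s.length := by omega
    have hno : ¬ sp <:+: s.drop (i + 1).toNat := by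
      rw [← PySem.Chars.findFrom_natCast_eq_neg_one_iff s sp (i + 1).toNat hkle]
      rw [← hkcast, ← pvFindFrom_end_len]
      exact hj
    unfold pvSpecL
    have hnil : List.filter (pvCond s sp) (List.range' (i + 1).toNat (s.length + 1 - (i + 1).toNat)) = [] := by
      rw [List.filter_eq_nil_iff]
      intro p hp
      rw [List.mem_range'_1] at hp
      have hnp : ¬ sp <+: s.drop p := fun hpre => hno (pvInfix_of_prefix_drop s sp _ p hp.1 hpre)
      simp [pvCond, hnp]
    rw [hnil]
    simp
  | case2 i hilen j hjne hcont ih =>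
    intro hi
    obtain ⟨jn, hjeq, hkj, hjl, hocc, hmin⟩ := pvFound s sp i hi hilen hjne
    have hj2 : j = (jn : Int) := hjeq
    rw [hj2] at hcont ih ⊢
    obtain ⟨hpos, hsp⟩ := hcont
    have h1 : ((jn : Int) - 1) = ((jn - 1 : Nat) : Int) := by omega
    rw [h1, PySem.List.pyGet?_natCast] at hsp
    have hcf : pvCond s sp jn = false := by
      simp [pvCond, hsp, show ¬ jn = 0 by omega]
    have htn : (((jn : Int)) + 1).toNat = jn + 1 := by omega
    rw [ih (by omega), htn, pvSpecL_split s sp (i + 1).toNat jn hkj hjl hmin, hcf]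
    simp
  | case3 i hilen j hjne hcont1 hcont2 ih =>
    intro hi
    obtain ⟨jn, hjeq, hkj, hjl, hocc, hmin⟩ := pvFound s sp i hi hilen hjne
    have hj2 : j = (jn : Int) := hjeq
    rw [hj2] at hcont2 ih ⊢
    obtain ⟨hlt, hsp⟩ := hcont2
    have h1 : ((jn : Int) + (sp.length : Int)) = ((jn + sp.length : Nat) : Int) := by push_cast; ring
    rw [h1, PySem.List.pyGet?_natCast] at hsp
    have hcf : pvCond s sp jn = false := by
      simp [pvCond, hsp, show ¬ s.length ≤ jn + sp.length + 1 by omega]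
    have htn : (((jn : Int)) + 1).toNat = jn + 1 := by omega
    rw [ih (by omega), htn, pvSpecL_split s sp (i + 1).toNat jn hkj hjl hmin, hcf]
    simp
  | case4 i hilen j hjne hcont1 hcont2 ih =>
    intro hi
    obtain ⟨jn, hjeq, hkj, hjl, hocc, hmin⟩ := pvFound s sp i hi hilen hjne
    have hj2 : j = (jn : Int) := hjeq
    rw [hj2] at hcont1 hcont2 ih ⊢
    push Not at hcont1 hcont2
    have hlb : (decide (jn = 0) || decide (s[jn - 1]? = some ' ')) = true := by
      by_cases h0 : jn = 0
      · simp [h0]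
      · have := hcont1 (by omega)
        have h1 : ((jn : Int) - 1) = ((jn - 1 : Nat) : Int) := by omega
        rw [h1, PySem.List.pyGet?_natCast] at this
        simp [this]
    have hrb : (decide (s.length ≤ jn + sp.length + 1) || decide (s[jn + sp.length]? = some ' ')) = true := by
      by_cases hb : s.length ≤ jn + sp.length + 1
      · simp [hb]
      · have := hcont2 (by omega)
        have h1 : ((jn : Int) + (sp.length : Int)) = ((jn + sp.length : Nat) : Int) := by push_cast; ring
        rw [h1, PySem.List.pyGet?_natCast] at this
        simp [this]
    have hct : pvCond s sp jn = true := by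
      simp only [pvCond, hlb, hrb, Bool.and_true]
      simp [hocc]
    have htn : (((jn : Int)) + 1).toNat = jn + 1 := by omega
    rw [ih (by omega), htn, pvSpecL_split s sp (i + 1).toNat jn hkj hjl hmin, hct]
    simp
  | case5 i hilen =>
    intro hi
    unfold pvSpecL
    have h0 : s.length + 1 - (i + 1).toNat = 0 := by omega
    rw [h0, List.range'_zero]
    simp

lemma pvAlt_eq (mention : List String) (words : List String) (words_str : String) (suffix_map : List (String × String)) :
    match_mention_alt mention words words_str suffix_map =
      pvSpecL words_str.toList (PySem.Str.lower ((PySem.List.pyGet? mention 2).getD "")).toList 0 := by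
  unfold match_mention_alt
  exact pvAltCore _ _

-- ===== VERDICT (by name: the statement is the Claim_ definition above) =====
theorem match_mention_spec : Claim_equal_match_mention := by
  intro mention words words_str suffix_map _ _
  unfold Spec_match_mention
  rw [pvAlt_eq]
  show pvLoopA _ _ (-1) = _
  rw [pvLoopA_eq _ _ _ (by omega)]
  norm_num
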